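-- pv_equiv track=rewrite | github.com/rodolfomac3/Reference-Genome | app.py | _degenerate_primer_hits_on_strand
-- ===== SOURCE A (Python) =====
-- from typing import Dict, List, Optional, Tuple
--
-- _IUPAC = {
--     "A":{"A"}, "C":{"C"}, "G":{"G"}, "T":{"T"},
--     "R":{"A","G"}, "Y":{"C","T"}, "S":{"G","C"}, "W":{"A","T"},
--     "K":{"G","T"}, "M":{"A","C"},
--     "B":{"C","G","T"}, "D":{"A","G","T"}, "H":{"A","C","T"}, "V":{"A","C","G"},
--     "N":{"A","C","G","T"},
--     "-":{"-"}  # treat gap as its own (for alignment paths)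
-- }
--
-- def _iupac_match(primer_char: str, template_char: str) -> bool:
--     p = primer_char.upper(); t = template_char.upper()
--     return t in _IUPAC.get(p, {p})
--
-- def _degenerate_primer_hits_on_strand(primer: str, template: str, max_mismatch: int, require_3prime_match: bool) -> List[int]:
--     """
--     Return list of start indices where primer matches template (IUPAC-aware).
--     If require_3prime_match=True, enforce last base exact compatibility.
--     """
--     p = primer.upper(); t = template.upper()
--     Lp = len(p); Lt = len(t)
--     hits = []
--     if Lp == 0 or Lt < Lp:
--         return hits
--     for i in range(0, Lt - Lp + 1):
--         seg = t[i:i+Lp]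
--         # enforce 3' base compatibility
--         if require_3prime_match and not _iupac_match(p[-1], seg[-1]):
--             continue
--         # count mismatches under IUPAC compatibility
--         mm = 0
--         ok = True
--         for a,b in zip(p, seg):
--             if not _iupac_match(a, b):
--                 mm += 1
--                 if mm > max_mismatch:
--                     ok = False; break
--         if ok:
--             hits.append(i)
--     return hits
-- ===== SOURCE B (Python) =====
-- from typing import List
--
-- _IUPAC = {
--     "A":{"A"}, "C":{"C"}, "G":{"G"}, "T":{"T"},
--     "R":{"A","G"}, "Y":{"C","T"}, "S":{"G","C"}, "W":{"A","T"},
--     "K":{"G","T"}, "M":{"A","C"},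
--     "B":{"C","G","T"}, "D":{"A","G","T"}, "H":{"A","C","T"}, "V":{"A","C","G"},
--     "N":{"A","C","G","T"},
--     "-":{"-"}
-- }
--
-- def _degenerate_primer_hits_on_strand(primer: str, template: str, max_mismatch: int, require_3prime_match: bool) -> List[int]:
--     """Transposed (primer-major) scan: accumulate a per-window mismatch-count
--     table column by column, then read the hits off the table in one pass."""
--     p = primer.upper(); t = template.upper()
--     Lp = len(p); Lt = len(t)
--     if Lp == 0 or Lt < Lp:
--         return []
--     n = Lt - Lp + 1
--     mm = [0] * n
--     for k in range(Lp):
--         allowed = _IUPAC.get(p[k], {p[k]})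
--         for i in range(n):
--             if t[i + k] not in allowed:
--                 mm[i] += 1
--     if require_3prime_match:
--         allowed = _IUPAC.get(p[-1], {p[-1]})
--         return [i for i in range(n) if mm[i] <= max_mismatch and t[i + Lp - 1] in allowed]
--     return [i for i in range(n) if mm[i] <= max_mismatch]
-- ===== Notes on version B (the rewrite author's own statement) =====
-- stated objective: alternative
-- what changed: A scans window by window with an early-break mismatch counter; B does a transposed primer-major pass that accumulates a per-window mismatch-count table and reads the hits off in one final pass; Pre_ excludes negative max_mismatch, a degenerate allowance outside the function's natural domain on which either behaviour is defensible (A reports zero-mismatch windows, B reports none).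
-- outside the precondition, e.g. on _degenerate_primer_hits_on_strand('A', 'A', -1, False): A returns [0], B returns []
import Mathlib
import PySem

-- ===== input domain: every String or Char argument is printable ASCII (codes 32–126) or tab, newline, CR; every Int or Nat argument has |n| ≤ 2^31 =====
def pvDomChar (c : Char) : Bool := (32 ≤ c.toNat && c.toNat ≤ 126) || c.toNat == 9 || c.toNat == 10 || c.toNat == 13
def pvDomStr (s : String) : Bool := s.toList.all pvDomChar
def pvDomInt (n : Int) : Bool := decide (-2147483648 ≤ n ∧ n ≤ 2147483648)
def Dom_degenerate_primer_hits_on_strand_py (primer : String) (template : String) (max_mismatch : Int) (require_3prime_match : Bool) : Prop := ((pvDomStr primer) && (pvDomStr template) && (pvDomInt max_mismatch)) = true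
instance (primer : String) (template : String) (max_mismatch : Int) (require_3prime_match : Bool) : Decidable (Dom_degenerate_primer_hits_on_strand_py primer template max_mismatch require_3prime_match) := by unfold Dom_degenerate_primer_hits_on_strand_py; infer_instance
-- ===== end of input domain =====

-- B replaces A's window-by-window scan (with early break) by a primer-major pass that
-- accumulates a per-window mismatch-count table, then reads the hits off in one pass;
-- objective: alternative (same O(Lp·Lt) cost, different traversal).

-- ===== PORT A =====

-- _IUPAC.get(c, {c}): the sets are used only for membership, ported as lists of their elements
def iupacAllowed (c : Char) : List Char :=
  match c with
  | 'A' => ['A'] | 'C' => ['C'] | 'G' => ['G'] | 'T' => ['T']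
  | 'R' => ['A', 'G'] | 'Y' => ['C', 'T'] | 'S' => ['G', 'C'] | 'W' => ['A', 'T']
  | 'K' => ['G', 'T'] | 'M' => ['A', 'C']
  | 'B' => ['C', 'G', 'T'] | 'D' => ['A', 'G', 'T'] | 'H' => ['A', 'C', 'T'] | 'V' => ['A', 'C', 'G']
  | 'N' => ['A', 'C', 'G', 'T'] | '-' => ['-']
  | _ => [c]

-- _iupac_match(p, t) = t.upper() in _IUPAC.get(p.upper(), {p.upper()})
def iupacMatchPy (a b : Char) : Bool :=
  (iupacAllowed (PySem.Chars.upperChar a)).contains (PySem.Chars.upperChar b)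

-- A's inner 'for a,b in zip(p, seg)' loop with the early 'break' (state: mm)
def innerA (mx : Int) : List (Char × Char) → Int → Bool
  | [], _ => true
  | ab :: rest, mm =>
    if !(iupacMatchPy ab.1 ab.2) then
      if mm + 1 > mx then false else innerA mx rest (mm + 1)
    else innerA mx rest mm

def degenerate_primer_hits_on_strand_py (primer : String) (template : String) (max_mismatch : Int) (require_3prime_match : Bool) : List Int :=
  let p := (PySem.Str.upper primer).toList
  let t := (PySem.Str.upper template).toList
  let Lp := p.length
  let Lt := t.length
  if Lp = 0 ∨ Lt < Lp then []
  else
    (PySem.List.pyRange 0 ((Lt : Int) - (Lp : Int) + 1) 1).foldl (fun hits i =>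
      let seg := PySem.List.slice t (some i) (some (i + (Lp : Int)))
      -- p[-1], seg[-1]: in range here (Lp ≠ 0, seg nonempty), pyGetD is exact
      if require_3prime_match && !(iupacMatchPy (PySem.List.pyGetD p (-1) ' ') (PySem.List.pyGetD seg (-1) ' ')) then hits
      else if innerA max_mismatch (p.zip seg) 0 then hits ++ [i] else hits) []

-- ===== PORT B =====

def degenerate_primer_hits_on_strand_py_alt (primer : String) (template : String) (max_mismatch : Int) (require_3prime_match : Bool) : List Int :=
  let p := (PySem.Str.upper primer).toList
  let t := (PySem.Str.upper template).toList
  let Lp := p.length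
  let Lt := t.length
  if Lp = 0 ∨ Lt < Lp then []
  else
    let n := Lt - Lp + 1
    -- range(Lp) / range(n) run over nonnegative ints only: ported as Nat ranges (exact);
    -- all list indices below are in range, so getD is exact
    let mm := (List.range Lp).foldl (fun mm k =>
        let allowed := iupacAllowed (p.getD k ' ')
        (List.range n).foldl (fun mm i =>
          if allowed.contains (t.getD (i + k) ' ') then mm else mm.modify i (· + 1)) mm)
      (List.replicate n (0 : Int))
    if require_3prime_match then
      let allowed3 := iupacAllowed (p.getD (Lp - 1) ' ')
      ((List.range n).filter (fun i =>
        decide (mm.getD i 0 ≤ max_mismatch) && allowed3.contains (t.getD (i + Lp - 1) ' '))).map (fun i => Int.ofNat i)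
    else
      ((List.range n).filter (fun i => decide (mm.getD i 0 ≤ max_mismatch))).map (fun i => Int.ofNat i)

-- ===== PRECONDITION & SPEC =====
-- Pre_ excludes negative max_mismatch: a negative mismatch allowance is outside the
-- function's natural domain and nobody would specify it; there either behaviour is
-- defensible (A reports zero-mismatch windows, B reports none).
def Pre_degenerate_primer_hits_on_strand_py (primer : String) (template : String) (max_mismatch : Int) (require_3prime_match : Bool) : Prop := 0 ≤ max_mismatch
instance (primer : String) (template : String) (max_mismatch : Int) (require_3prime_match : Bool) : Decidable (Pre_degenerate_primer_hits_on_strand_py primer template max_mismatch require_3prime_match) := by unfold Pre_degenerate_primer_hits_on_strand_py; infer_instance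

def pvWitness_degenerate_primer_hits_on_strand_py : String × String × Int × Bool := ("ACN", "ACGTACGT", 1, true)

def Spec_degenerate_primer_hits_on_strand_py (primer : String) (template : String) (max_mismatch : Int) (require_3prime_match : Bool) (out : List Int) : Prop := out = degenerate_primer_hits_on_strand_py_alt primer template max_mismatch require_3prime_match
instance (primer : String) (template : String) (max_mismatch : Int) (require_3prime_match : Bool) (out : List Int) : Decidable (Spec_degenerate_primer_hits_on_strand_py primer template max_mismatch require_3prime_match out) := by unfold Spec_degenerate_primer_hits_on_strand_py; infer_instance

-- ===== CLAIM (what is proved, stated in full; the proofs are below) =====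
def Claim_equal_degenerate_primer_hits_on_strand_py : Prop := ∀ (primer : String) (template : String) (max_mismatch : Int) (require_3prime_match : Bool), Dom_degenerate_primer_hits_on_strand_py primer template max_mismatch require_3prime_match → Pre_degenerate_primer_hits_on_strand_py primer template max_mismatch require_3prime_match → Spec_degenerate_primer_hits_on_strand_py primer template max_mismatch require_3prime_match (degenerate_primer_hits_on_strand_py primer template max_mismatch require_3prime_match)

-- ===== LEMMAS AND PROOFS =====

lemma upperChar_idem (c : Char) : PySem.Chars.upperChar (PySem.Chars.upperChar c) = PySem.Chars.upperChar c := by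
  unfold PySem.Chars.upperChar PySem.Chars.islower
  split_ifs with h1 h2 <;> try rfl
  exfalso
  simp only [Bool.and_eq_true, decide_eq_true_eq, Char.le_def, UInt32.le_iff_toNat_le] at h1 h2
  have hlo : 97 ≤ c.toNat := h1.1
  have hhi : c.toNat ≤ 122 := h1.2
  have hv : (Char.ofNat (c.toNat - 32)).toNat = c.toNat - 32 := by
    rw [Char.toNat_ofNat]
    have : (c.toNat - 32).isValidChar := Or.inl (by omega)
    simp [this]
  have h2' : 97 ≤ (Char.ofNat (c.toNat - 32)).toNat := h2.1
  omega

-- elements of an uppercased list (and the default ' ') are fixed points of upperChar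
lemma upperChar_getD_upper (l : List Char) (k : Nat) :
    PySem.Chars.upperChar ((PySem.Chars.upper l).getD k ' ') = (PySem.Chars.upper l).getD k ' ' := by
  by_cases h : k < (PySem.Chars.upper l).length
  · rw [List.getD_eq_getElem _ _ h]
    have hk : k < l.length := by simpa [PySem.Chars.upper] using h
    simp [PySem.Chars.upper, upperChar_idem]
  · rw [List.getD_eq_default _ _ (by omega)]
    decide

-- iupacMatchPy on characters that are upperChar-fixed is a plain membership test
lemma iupacMatchPy_fixed (a b : Char)
    (ha : PySem.Chars.upperChar a = a) (hb : PySem.Chars.upperChar b = b) :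
    iupacMatchPy a b = (iupacAllowed a).contains b := by
  unfold iupacMatchPy; rw [ha, hb]

-- A's early-break inner loop decides 'the total mismatch count is 0 or ≤ mx'
lemma innerA_eq (mx : Int) (l : List (Char × Char)) (mm : Int) :
    innerA mx l mm
      = decide ((l.countP (fun ab => !(iupacMatchPy ab.1 ab.2)) : Int) = 0
          ∨ mm + (l.countP (fun ab => !(iupacMatchPy ab.1 ab.2)) : Int) ≤ mx) := by
  induction l generalizing mm with
  | nil => simp [innerA]
  | cons ab rest ih =>
    rw [innerA]
    have hC : (0 : Int) ≤ (rest.countP (fun ab => !(iupacMatchPy ab.1 ab.2)) : Int) :=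
      Int.natCast_nonneg _
    by_cases h : iupacMatchPy ab.1 ab.2
    · rw [if_neg (by simp [h]), ih, decide_eq_decide, List.countP_cons, if_neg (by simp [h])]
      simp
    · have hb : (!(iupacMatchPy ab.1 ab.2)) = true := by simp [h]
      rw [if_pos hb, List.countP_cons, if_pos hb]
      by_cases hgt : mm + 1 > mx
      · rw [if_pos hgt]
        symm
        rw [decide_eq_false_iff_not]
        push_cast
        omega
      · rw [if_neg hgt, ih, decide_eq_decide]
        push_cast
        omega

-- zip as a map over the index range (defaults never used: k < xs.length ≤ ys.length)
lemma zip_eq_map_range {α : Type} (d : α) :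
    ∀ (xs ys : List α), xs.length ≤ ys.length →
      xs.zip ys = (List.range xs.length).map (fun k => (xs.getD k d, ys.getD k d))
  | [], _, _ => by simp
  | x :: xs, [], h => by simp at h
  | x :: xs, y :: ys, h => by
    have ih := zip_eq_map_range d xs ys (by simpa using h)
    simp only [List.zip_cons_cons, List.length_cons, List.range_succ_eq_map,
      List.map_cons, List.map_map]
    refine congrArg₂ _ (by simp) ?_
    rw [ih]
    apply List.map_congr_left
    intro k _
    simp

-- the inner 'for i in range(n): mm[i] += 1 (unless hit)' pass, as a pointwise map
lemma inner_fold_eq (b : Nat → Bool) (k : Nat) (mm0 : List Int) :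
    (List.range k).foldl (fun mm i => if b i then mm else mm.modify i (· + 1)) mm0
      = mm0.mapIdx (fun i v => if i < k then (if b i then v else v + 1) else v) := by
  induction k with
  | zero =>
    apply List.ext_getElem (by simp)
    intro j h1 h2
    simp [List.getElem_mapIdx]
  | succ k ih =>
    rw [List.range_succ, List.foldl_append, ih, List.foldl_cons, List.foldl_nil]
    by_cases h : b k
    · rw [if_pos h]
      apply List.ext_getElem (by simp)
      intro j h1 h2
      simp only [List.getElem_mapIdx]
      rcases Nat.lt_trichotomy j k with hj | hj | hj
      · rw [if_pos hj, if_pos (show j < k + 1 by omega)]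
      · subst hj
        rw [if_neg (show ¬ j < j by omega), if_pos (show j < j + 1 by omega), if_pos h]
      · rw [if_neg (show ¬ j < k by omega), if_neg (show ¬ j < k + 1 by omega)]
    · rw [if_neg h]
      apply List.ext_getElem (by simp)
      intro j h1 h2
      rw [List.getElem_modify]
      simp only [List.getElem_mapIdx]
      rcases Nat.lt_trichotomy j k with hj | hj | hj
      · rw [if_neg (show ¬ k = j by omega), if_pos hj, if_pos (show j < k + 1 by omega)]
      · subst hj
        rw [if_pos rfl, if_neg (show ¬ j < j by omega), if_pos (show j < j + 1 by omega), if_neg h]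
      · rw [if_neg (show ¬ k = j by omega), if_neg (show ¬ j < k by omega),
          if_neg (show ¬ j < k + 1 by omega)]

-- the whole primer-major double loop accumulates, per window, the mismatch count
lemma outer_fold_eq (c : Nat → Nat → Bool) (n : Nat) :
    ∀ (ks : List Nat) (mm0 : List Int), mm0.length = n →
      ks.foldl (fun mm k =>
          (List.range n).foldl (fun mm i => if c k i then mm else mm.modify i (· + 1)) mm) mm0
        = mm0.mapIdx (fun i v => v + (ks.countP (fun k => !(c k i)) : Int))
  | [], mm0, _ => by
    apply List.ext_getElem (by simp)
    intro j h1 h2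
    simp [List.getElem_mapIdx]
  | k :: ks, mm0, h => by
    rw [List.foldl_cons, inner_fold_eq (c k) n mm0]
    rw [outer_fold_eq c n ks _ (by simp [h])]
    rw [List.mapIdx_mapIdx]
    apply List.ext_getElem (by simp)
    intro j h1 h2
    simp only [List.getElem_mapIdx, Function.comp]
    have hj : j < n := by simp at h1; omega
    rw [if_pos hj]
    simp only [List.countP_cons]
    by_cases hc : c k j <;> simp [hc] <;> push_cast <;> ring

-- B's per-window mismatch count, read off the table
lemma mm_getD_eq (c : Nat → Nat → Bool) (n Lp : Nat) (i : Nat) (hi : i < n) :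
    (((List.range Lp).foldl (fun mm k =>
        (List.range n).foldl (fun mm i => if c k i then mm else mm.modify i (· + 1)) mm)
      (List.replicate n (0 : Int))).getD i 0)
      = ((List.range Lp).countP (fun k => !(c k i)) : Int) := by
  rw [outer_fold_eq c n (List.range Lp) _ (by simp)]
  rw [List.getD_eq_getElem _ _ (by simp [hi])]
  simp [List.getElem_mapIdx]

-- A's 'skip window / append window' loop, as a filter
lemma foldl_skip_if (g h : Int → Bool) (l : List Int) (acc : List Int) :
    l.foldl (fun hits i => if g i then hits else if h i then hits ++ [i] else hits) acc
      = acc ++ l.filter (fun i => !(g i) && h i) := by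
  induction l generalizing acc with
  | nil => simp
  | cons x l ih =>
    rw [List.foldl_cons, List.filter_cons]
    by_cases hg : g x
    · rw [if_pos hg, ih]
      simp [hg]
    · rw [if_neg hg]
      by_cases hh : h x
      · rw [if_pos hh, ih]
        simp [hg, hh]
      · rw [if_neg hh, ih]
        simp [hg, hh]

lemma seg_length (tl : List Char) (i Lp : Nat) (hin : i + Lp ≤ tl.length) :
    ((tl.drop i).take Lp).length = Lp := by
  simp
  omega

lemma seg_getD (tl : List Char) (i Lp k : Nat) (hk : k < Lp) (hin : i + Lp ≤ tl.length) :
    ((tl.drop i).take Lp).getD k ' ' = tl.getD (i + k) ' ' := by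
  rw [List.getD_eq_getElem _ _ (by rw [seg_length tl i Lp hin]; omega),
    List.getD_eq_getElem _ _ (by omega)]
  rw [List.getElem_take, List.getElem_drop]

lemma pyGetD_neg_one_getD (xs : List Char) (h : xs ≠ []) :
    PySem.List.pyGetD xs (-1) ' ' = xs.getD (xs.length - 1) ' ' := by
  have hpos : 0 < xs.length := List.length_pos_iff.mpr h
  rw [PySem.List.pyGetD_neg_one xs ' ' h, List.getLast_eq_getElem,
    List.getD_eq_getElem _ _ (by omega)]

-- for a nonnegative count and a nonnegative bound, A's loop condition is B's threshold test
lemma count_cond_iff (cnt mx : Int) (h : 0 ≤ cnt) (hmx : 0 ≤ mx) :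
    (cnt = 0 ∨ cnt ≤ mx) ↔ cnt ≤ mx := by
  omega

-- ===== VERDICT (by name: the statement is the Claim_ definition above) =====
theorem degenerate_primer_hits_on_strand_py_spec : Claim_equal_degenerate_primer_hits_on_strand_py := by
  intro primer template mx req _dom hpre
  unfold Pre_degenerate_primer_hits_on_strand_py at hpre
  unfold Spec_degenerate_primer_hits_on_strand_py
  unfold degenerate_primer_hits_on_strand_py degenerate_primer_hits_on_strand_py_alt
  simp only [PySem.Str.toList_upper]
  set pl := PySem.Chars.upper primer.toList with hpl
  set tl := PySem.Chars.upper template.toList with htl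
  have hP : ∀ k, PySem.Chars.upperChar (pl.getD k ' ') = pl.getD k ' ' := by
    intro k; rw [hpl]; exact upperChar_getD_upper primer.toList k
  have hT : ∀ k, PySem.Chars.upperChar (tl.getD k ' ') = tl.getD k ' ' := by
    intro k; rw [htl]; exact upperChar_getD_upper template.toList k
  by_cases hdeg : pl.length = 0 ∨ tl.length < pl.length
  · rw [if_pos hdeg, if_pos hdeg]
  · rw [if_neg hdeg, if_neg hdeg]
    push_neg at hdeg
    obtain ⟨hLp0, hle⟩ := hdeg
    rw [foldl_skip_if]
    rw [show ((tl.length : Int) - (pl.length : Int) + 1)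
        = ((tl.length - pl.length + 1 : Nat) : Int) from by omega]
    rw [PySem.List.pyRange_zero_natCast (tl.length - pl.length + 1), List.filter_map,
      List.nil_append]
    set n := tl.length - pl.length + 1 with hn
    -- per-window facts, for i < n
    have hwin : ∀ i : Nat, i < n →
        (innerA mx (pl.zip (PySem.List.slice tl (some (i : Int)) (some ((i : Int) + (pl.length : Int))))) 0)
          = decide ((((List.range pl.length).foldl (fun mm k =>
              (List.range n).foldl (fun mm j =>
                if (iupacAllowed (pl.getD k ' ')).contains (tl.getD (j + k) ' ') then mm
                else mm.modify j (· + 1)) mm) (List.replicate n (0 : Int))).getD i 0)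
              ≤ mx) := by
      intro i hi
      have hin : i + pl.length ≤ tl.length := by omega
      rw [PySem.List.slice_natCast_add tl i pl.length]
      rw [zip_eq_map_range ' ' pl ((tl.drop i).take pl.length)
        (by rw [seg_length tl i pl.length hin])]
      rw [innerA_eq, List.countP_map]
      have hcnt : (List.range pl.length).countP
          ((fun ab => !(iupacMatchPy ab.1 ab.2)) ∘ fun k => (pl.getD k ' ', ((tl.drop i).take pl.length).getD k ' '))
          = (List.range pl.length).countP
            (fun k => !((iupacAllowed (pl.getD k ' ')).contains (tl.getD (i + k) ' '))) := by
        apply List.countP_congr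
        intro k hk
        rw [List.mem_range] at hk
        simp only [Function.comp]
        rw [seg_getD tl i pl.length k hk hin, iupacMatchPy_fixed _ _ (hP k) (hT (i + k))]
      rw [hcnt]
      rw [mm_getD_eq (fun k j => (iupacAllowed (pl.getD k ' ')).contains (tl.getD (j + k) ' '))
        n pl.length i hi]
      rw [decide_eq_decide, zero_add]
      exact count_cond_iff _ mx (Int.natCast_nonneg _) hpre
    cases req with
    | false =>
      rw [if_neg Bool.false_ne_true]
      simp only [Int.ofNat_eq_natCast]
      apply congrArg
      apply List.filter_congr
      intro i hi
      rw [List.mem_range] at hi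
      simp only [Function.comp, Bool.false_and, Bool.not_false, Bool.true_and]
      exact hwin i hi
    | true =>
      rw [if_pos rfl]
      simp only [Int.ofNat_eq_natCast]
      apply congrArg
      apply List.filter_congr
      intro i hi
      rw [List.mem_range] at hi
      have hin : i + pl.length ≤ tl.length := by omega
      simp only [Function.comp, Bool.true_and, Bool.not_not]
      rw [hwin i hi]
      have hplne : pl ≠ [] := by
        intro hnil; apply hLp0; rw [hnil]; rfl
      have hsegne : (tl.drop i).take pl.length ≠ [] := by
        intro hnil
        have := seg_length tl i pl.length hin
        rw [hnil] at this
        simp at this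
        omega
      rw [PySem.List.slice_natCast_add tl i pl.length]
      rw [pyGetD_neg_one_getD pl hplne, pyGetD_neg_one_getD _ hsegne]
      rw [show ((tl.drop i).take pl.length).length = pl.length from seg_length tl i pl.length hin]
      rw [seg_getD tl i pl.length (pl.length - 1) (by omega) hin]
      rw [iupacMatchPy_fixed _ _ (hP (pl.length - 1)) (hT (i + (pl.length - 1)))]
      rw [show i + (pl.length - 1) = i + pl.length - 1 from by omega]
      rw [Bool.and_comm]
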